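-- pv_equiv track=rewrite | github.com/hjh1248/Algorithms | board.py | solution
-- ===== SOURCE A (Python) =====
-- def solution(board):
--     answer = 0
--     newboard = [[0]*len(board[0]) for _ in range(len(board))]
--     for i in range(len(board)):
--         for j in range(len(board[0])):
--             if board[i][j] == 1:
--                 for x in range(max(0, i-1), min(len(board), i+2)):
--                     for y in range(max(0, j-1), min(len(board[0]), j+2)):
--                         newboard[x][y] = 1
--     for i in range(len(newboard)):
--         for j in range(len(newboard[0])):
--             if newboard[i][j] == 0:
--                 answer += 1
--     return answer
-- ===== SOURCE B (Python) =====
-- def solution(board):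
--     answer = 0
--     for i in range(len(board)):
--         for j in range(len(board[0])):
--             if not any(board[x][y] == 1
--                        for x in range(max(0, i - 1), min(len(board), i + 2))
--                        for y in range(max(0, j - 1), min(len(board[0]), j + 2))):
--                 answer += 1
--     return answer
-- ===== Notes on version B (the rewrite author's own statement) =====
-- stated objective: simpler
-- what changed: Replaced the scatter-then-count two-pass structure (building an auxiliary newboard marking every 3x3 neighborhood of a 1, then counting its zeros) with a single gather pass that, per cell, scans its clamped 3x3 neighborhood for a 1 and counts directly, eliminating the auxiliary board.
import Mathlib
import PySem

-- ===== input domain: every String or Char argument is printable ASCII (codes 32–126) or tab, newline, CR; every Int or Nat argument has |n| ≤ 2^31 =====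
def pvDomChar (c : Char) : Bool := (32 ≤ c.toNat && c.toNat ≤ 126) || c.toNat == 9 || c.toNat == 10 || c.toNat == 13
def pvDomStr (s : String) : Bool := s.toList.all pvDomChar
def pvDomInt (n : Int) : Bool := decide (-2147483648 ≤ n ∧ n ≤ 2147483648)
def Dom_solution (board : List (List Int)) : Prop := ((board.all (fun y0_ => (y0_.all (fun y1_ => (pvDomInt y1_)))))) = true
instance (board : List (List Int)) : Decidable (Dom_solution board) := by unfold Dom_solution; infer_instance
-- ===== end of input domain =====

-- B replaces A's scatter-then-count two-pass (auxiliary newboard marking neighborhoods of 1s,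
-- then counting zeros) with a single gather pass that counts cells whose clamped 3x3
-- neighborhood contains no 1; same result, no auxiliary board.


-- ===== PORT A =====
-- Literal transliteration of A: build newboard, scatter 1s over clamped 3x3 boxes, count zeros.
-- board[0] is total here via pyGetD; Pre_solution restricts to boards where Python's board[0]
-- and board[i][j] accesses do not raise.
def solution (board : List (List Int)) : Int :=
  let nb0 : List (List Int) :=
    List.replicate board.length (List.replicate (PySem.List.pyGetD board 0 []).length (0 : Int))
  let nb : List (List Int) :=
    (PySem.List.pyRange 0 (board.length : Int) 1).foldl (fun nb i =>
      (PySem.List.pyRange 0 ((PySem.List.pyGetD board 0 []).length : Int) 1).foldl (fun nb j =>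
        if PySem.List.pyGetD (PySem.List.pyGetD board i []) j 0 == 1 then
          (PySem.List.pyRange (max 0 (i - 1)) (min (board.length : Int) (i + 2)) 1).foldl (fun nb x =>
            (PySem.List.pyRange (max 0 (j - 1)) (min ((PySem.List.pyGetD board 0 []).length : Int) (j + 2)) 1).foldl (fun nb y =>
              PySem.List.pySetD nb x (PySem.List.pySetD (PySem.List.pyGetD nb x []) y 1)) nb) nb
        else nb) nb) nb0
  (PySem.List.pyRange 0 (nb.length : Int) 1).foldl (fun answer i =>
    (PySem.List.pyRange 0 ((PySem.List.pyGetD nb 0 []).length : Int) 1).foldl (fun answer j =>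
      if PySem.List.pyGetD (PySem.List.pyGetD nb i []) j 0 == 0 then answer + 1 else answer) answer) 0

-- ===== PORT B =====
-- Literal transliteration of B: one pass; a cell counts iff no 1 in its clamped 3x3 box.
def solution_alt (board : List (List Int)) : Int :=
  (PySem.List.pyRange 0 (board.length : Int) 1).foldl (fun answer i =>
    (PySem.List.pyRange 0 ((PySem.List.pyGetD board 0 []).length : Int) 1).foldl (fun answer j =>
      if !((PySem.List.pyRange (max 0 (i - 1)) (min (board.length : Int) (i + 2)) 1).any (fun x =>
            (PySem.List.pyRange (max 0 (j - 1)) (min ((PySem.List.pyGetD board 0 []).length : Int) (j + 2)) 1).any (fun y =>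
              PySem.List.pyGetD (PySem.List.pyGetD board x []) y 0 == 1)))
      then answer + 1 else answer) answer) 0

-- ===== PRECONDITION & SPEC =====
-- Pre_ excludes exactly the inputs where Python A raises IndexError: ragged boards
-- with some row shorter than row 0 (board[i][j]); the empty board is admitted (A returns 0).
def Pre_solution (board : List (List Int)) : Prop :=
  ∀ r ∈ board, (board.headD []).length ≤ r.length
instance (board : List (List Int)) : Decidable (Pre_solution board) := by
  unfold Pre_solution; infer_instance
def pvWitness_solution : List (List Int) := [[1, 0], [0, 0]]
def Spec_solution (board : List (List Int)) (out : Int) : Prop := out = solution_alt board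
instance (board : List (List Int)) (out : Int) : Decidable (Spec_solution board out) := by
  unfold Spec_solution; infer_instance

-- ===== CLAIM (what is proved, stated in full; the proofs are below) =====
def Claim_equal_solution : Prop := ∀ (board : List (List Int)), Dom_solution board → Pre_solution board → Spec_solution board (solution board)

-- ===== LEMMAS AND PROOFS =====

-- value of cell (x, y) of a board, as both programs read it
def gcell (nb : List (List Int)) (x y : Int) : Int :=
  PySem.List.pyGetD (PySem.List.pyGetD nb x []) y 0

-- newboard[x][y] = 1
def mark (nb : List (List Int)) (p : Int × Int) : List (List Int) :=
  PySem.List.pySetD nb p.1 (PySem.List.pySetD (PySem.List.pyGetD nb p.1 []) p.2 1)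

-- the clamped 3x3 box around (i, j), as a flat list of coordinates
def box (m n i j : Int) : List (Int × Int) :=
  (PySem.List.pyRange (max 0 (i - 1)) (min m (i + 2)) 1).flatMap (fun x =>
    (PySem.List.pyRange (max 0 (j - 1)) (min n (j + 2)) 1).map (fun y => (x, y)))

-- all marks A's scatter phase performs, in order
def opsOf (board : List (List Int)) (m n : Int) : List (Int × Int) :=
  (PySem.List.pyRange 0 m 1).flatMap (fun i =>
    (PySem.List.pyRange 0 n 1).flatMap (fun j =>
      if PySem.List.pyGetD (PySem.List.pyGetD board i []) j 0 == 1 then box m n i j else []))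

def Shaped (m n : Nat) (nb : List (List Int)) : Prop :=
  nb.length = m ∧ ∀ r ∈ nb, r.length = n

theorem shaped_mark (m n : Nat) (nb : List (List Int)) (p : Int × Int)
    (hs : Shaped m n nb)
    (hp : 0 ≤ p.1 ∧ p.1 < (m : Int) ∧ 0 ≤ p.2 ∧ p.2 < (n : Int)) :
    Shaped m n (mark nb p) := by
  obtain ⟨hlen, hrows⟩ := hs
  obtain ⟨h1, h2, h3, h4⟩ := hp
  have hlt : p.1.toNat < nb.length := by omega
  unfold mark
  rw [PySem.List.pySetD_of_nonneg _ _ h1]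
  constructor
  · simpa using hlen
  · intro r hr
    rcases List.mem_or_eq_of_mem_set hr with hmem | heq
    · exact hrows r hmem
    · subst heq
      rw [PySem.List.pySetD_of_nonneg _ _ h3,
          PySem.List.pyGetD_eq_getElem _ _ h1 (by omega)]
      simp [hrows _ (List.getElem_mem hlt)]

theorem gcell_mark (m n : Nat) (nb : List (List Int)) (p : Int × Int)
    (hs : Shaped m n nb)
    (hp : 0 ≤ p.1 ∧ p.1 < (m : Int) ∧ 0 ≤ p.2 ∧ p.2 < (n : Int))
    (x y : Int) (hx : 0 ≤ x ∧ x < (m : Int)) (hy : 0 ≤ y ∧ y < (n : Int)) :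
    gcell (mark nb p) x y = if p = (x, y) then 1 else gcell nb x y := by
  obtain ⟨hlen, hrows⟩ := hs
  obtain ⟨h1, h2, h3, h4⟩ := hp
  have hplt : p.1.toNat < nb.length := by omega
  have hxlt : x.toNat < nb.length := by omega
  unfold mark gcell
  rw [PySem.List.pySetD_of_nonneg _ _ h1,
      PySem.List.pySetD_of_nonneg _ _ h3,
      PySem.List.pyGetD_eq_getElem _ _ h1 (by omega),
      PySem.List.pyGetD_eq_getElem (nb.set p.1.toNat _) _ hx.1 (by simp; omega),
      PySem.List.pyGetD_eq_getElem _ _ hx.1 (by omega),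
      List.getElem_set]
  by_cases hpx : p.1.toNat = x.toNat
  · simp only [hpx, if_true]
    have hrown : (nb[x.toNat]).length = n := hrows _ (List.getElem_mem hxlt)
    have hylt : y.toNat < (nb[x.toNat]).length := by omega
    have hplt2 : p.2.toNat < (nb[x.toNat]).length := by omega
    have hpx' : p.1 = x := by omega
    rw [PySem.List.pyGetD_eq_getElem _ _ hy.1 (by simp; omega),
        PySem.List.pyGetD_eq_getElem _ _ hy.1 (by omega),
        List.getElem_set]
    by_cases hpy : p.2.toNat = y.toNat
    · have : p = (x, y) := by
        obtain ⟨a, b⟩ := p; simp_all; omega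
      simp [this]
    · have : p ≠ (x, y) := by
        intro h; subst h; omega
      simp [this, hpy]
  · have : p ≠ (x, y) := by
      intro h; subst h; omega
    simp [this, hpx]

theorem gcell_foldl (m n : Nat) (ops : List (Int × Int)) (nb : List (List Int))
    (hs : Shaped m n nb)
    (hops : ∀ p ∈ ops, 0 ≤ p.1 ∧ p.1 < (m : Int) ∧ 0 ≤ p.2 ∧ p.2 < (n : Int))
    (x y : Int) (hx : 0 ≤ x ∧ x < (m : Int)) (hy : 0 ≤ y ∧ y < (n : Int)) :
    gcell (ops.foldl mark nb) x y = if (x, y) ∈ ops then 1 else gcell nb x y := by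
  induction ops generalizing nb with
  | nil => simp
  | cons p rest ih =>
    have hp := hops p (List.mem_cons_self ..)
    rw [List.foldl_cons,
        ih (mark nb p) (shaped_mark m n nb p hs hp)
          (fun q hq => hops q (List.mem_cons_of_mem _ hq)),
        gcell_mark m n nb p hs hp x y hx hy]
    by_cases hmem : (x, y) ∈ rest
    · simp [hmem]
    · by_cases hpe : p = (x, y)
      · simp [hpe, hmem]
      · have hne : (x, y) ≠ p := fun h => hpe h.symm
        simp [hpe, hmem, hne]

theorem shaped_foldl (m n : Nat) (ops : List (Int × Int)) (nb : List (List Int))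
    (hops : ∀ p ∈ ops, 0 ≤ p.1 ∧ p.1 < (m : Int) ∧ 0 ≤ p.2 ∧ p.2 < (n : Int))
    (hs : Shaped m n nb) : Shaped m n (ops.foldl mark nb) := by
  induction ops generalizing nb with
  | nil => simpa
  | cons p rest ih =>
    simp only [List.foldl_cons]
    apply ih
    · exact fun q hq => hops q (List.mem_cons_of_mem _ hq)
    · exact shaped_mark m n nb p hs (hops p (List.mem_cons_self ..))

theorem opsOf_bounds (board : List (List Int)) (m n : Nat) (p : Int × Int)
    (hp : p ∈ opsOf board (m : Int) (n : Int)) :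
    0 ≤ p.1 ∧ p.1 < (m : Int) ∧ 0 ≤ p.2 ∧ p.2 < (n : Int) := by
  unfold opsOf box at hp
  simp only [List.mem_flatMap, PySem.List.mem_pyRange_one] at hp
  obtain ⟨i, hi, j, hj, hp⟩ := hp
  split at hp
  · simp only [List.mem_flatMap, List.mem_map, PySem.List.mem_pyRange_one] at hp
    obtain ⟨x, hx, y, hy, rfl⟩ := hp
    simp only []
    omega
  · simp at hp

theorem mem_opsOf (board : List (List Int)) (m n : Nat) (x y : Int)
    (hx : 0 ≤ x ∧ x < (m : Int)) (hy : 0 ≤ y ∧ y < (n : Int)) :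
    (x, y) ∈ opsOf board (m : Int) (n : Int) ↔
      ((PySem.List.pyRange (max 0 (x - 1)) (min (m : Int) (x + 2)) 1).any (fun i =>
        (PySem.List.pyRange (max 0 (y - 1)) (min (n : Int) (y + 2)) 1).any (fun j =>
          PySem.List.pyGetD (PySem.List.pyGetD board i []) j 0 == 1))) = true := by
  unfold opsOf box
  simp only [List.mem_flatMap, List.mem_ite_nil_right, List.mem_map, List.any_eq_true,
    PySem.List.mem_pyRange_one, Prod.mk.injEq]
  constructor
  · rintro ⟨i, hi, j, hj, hcond, x', hx', y', hy', rfl, rfl⟩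
    exact ⟨i, by omega, j, by omega, hcond⟩
  · rintro ⟨i, hi, j, hj, hcond⟩
    exact ⟨i, by omega, j, by omega, hcond, x, by omega, y, by omega, rfl, rfl⟩

theorem gcell_replicate (M N : Nat) (x y : Int)
    (hx : 0 ≤ x ∧ x < (M : Int)) (hy : 0 ≤ y ∧ y < (N : Int)) :
    gcell (List.replicate M (List.replicate N (0 : Int))) x y = 0 := by
  unfold gcell
  rw [PySem.List.pyGetD_eq_getElem _ _ hx.1 (by simp; omega), List.getElem_replicate,
      PySem.List.pyGetD_eq_getElem _ _ hy.1 (by simp; omega), List.getElem_replicate]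

theorem scatter_eq (board : List (List Int)) (m n : Int) (nb0 : List (List Int)) :
    (PySem.List.pyRange 0 m 1).foldl (fun nb i =>
      (PySem.List.pyRange 0 n 1).foldl (fun nb j =>
        if PySem.List.pyGetD (PySem.List.pyGetD board i []) j 0 == 1 then
          (PySem.List.pyRange (max 0 (i - 1)) (min m (i + 2)) 1).foldl (fun nb x =>
            (PySem.List.pyRange (max 0 (j - 1)) (min n (j + 2)) 1).foldl (fun nb y =>
              PySem.List.pySetD nb x (PySem.List.pySetD (PySem.List.pyGetD nb x []) y 1)) nb) nb
        else nb) nb) nb0 = (opsOf board m n).foldl mark nb0 := by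
  unfold opsOf
  rw [List.foldl_flatMap]
  apply PySem.List.foldl_congr_mem
  intro acc i _
  rw [List.foldl_flatMap]
  apply PySem.List.foldl_congr_mem
  intro acc2 j _
  split
  · unfold box
    rw [List.foldl_flatMap]
    apply PySem.List.foldl_congr_mem
    intro acc3 x _
    rw [List.foldl_map]
    rfl
  · rfl

-- ===== VERDICT (by name: the statement is the Claim_ definition above) =====
theorem solution_spec : Claim_equal_solution := by
  intro board _ hrowlen
  by_cases hne : board = []
  · subst hne; rfl
  unfold Spec_solution solution solution_alt
  simp only []
  rw [scatter_eq]
  -- abbreviations for the dimensions and the scattered ops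
  have hM : 0 < board.length := List.length_pos_iff.mpr hne
  have hrows : ∀ r ∈ board, (PySem.List.pyGetD board 0 []).length ≤ r.length := by
    intro r hr
    have h0 : PySem.List.pyGetD board 0 [] = board.headD [] := by
      rw [PySem.List.pyGetD_zero]
      cases board with
      | nil => rfl
      | cons a b => rfl
    rw [h0]; exact hrowlen r hr
  set M := board.length with hMdef
  set N := (PySem.List.pyGetD board 0 []).length with hNdef
  set nb0 := List.replicate M (List.replicate N (0 : Int)) with hnb0
  set ops := opsOf board (M : Int) (N : Int) with hops
  set NB := ops.foldl mark nb0 with hNB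
  have hs0 : Shaped M N nb0 := by
    constructor
    · simp [hnb0]
    · intro r hr
      rw [hnb0] at hr
      rw [List.eq_of_mem_replicate hr]
      simp
  have hsh : Shaped M N NB :=
    shaped_foldl M N ops nb0 (fun p hp => opsOf_bounds board M N p hp) hs0
  have hlenNB : (NB.length : Int) = (M : Int) := by exact_mod_cast hsh.1
  rw [hlenNB]
  have hrow0 : ((PySem.List.pyGetD NB 0 []).length : Int) = (N : Int) := by
    have hpos : 0 < NB.length := by omega
    rw [PySem.List.pyGetD_eq_getElem _ _ (by omega) (by exact_mod_cast hpos)]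
    exact_mod_cast hsh.2 _ (List.getElem_mem (by simpa using hpos))
  rw [hrow0]
  apply PySem.List.foldl_congr_mem
  intro ans i hi
  rw [PySem.List.mem_pyRange_one] at hi
  apply PySem.List.foldl_congr_mem
  intro ans2 j hj
  rw [PySem.List.mem_pyRange_one] at hj
  have hi' : 0 ≤ i ∧ i < (M : Int) := by omega
  have hj' : 0 ≤ j ∧ j < (N : Int) := by omega
  have hcell : PySem.List.pyGetD (PySem.List.pyGetD NB i []) j 0 =
      if (i, j) ∈ ops then 1 else 0 := by
    have h := gcell_foldl M N ops nb0 hs0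
      (fun p hp => opsOf_bounds board M N p hp) i j hi' hj'
    rw [← hNB] at h
    rw [show gcell nb0 i j = 0 from by
      rw [hnb0]; exact gcell_replicate M N i j hi' hj'] at h
    unfold gcell at h
    rw [h]
  rw [hcell]
  have hmem := mem_opsOf board M N i j hi' hj'
  rw [← hops] at hmem
  by_cases hin : (i, j) ∈ ops
  · have : ((PySem.List.pyRange (max 0 (i - 1)) (min (M : Int) (i + 2)) 1).any fun x =>
      (PySem.List.pyRange (max 0 (j - 1)) (min (N : Int) (j + 2)) 1).any fun y =>
        PySem.List.pyGetD (PySem.List.pyGetD board x []) y 0 == 1) = true := hmem.mp hin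
    rw [if_pos hin, this]
    norm_num
  · have : ((PySem.List.pyRange (max 0 (i - 1)) (min (M : Int) (i + 2)) 1).any fun x =>
      (PySem.List.pyRange (max 0 (j - 1)) (min (N : Int) (j + 2)) 1).any fun y =>
        PySem.List.pyGetD (PySem.List.pyGetD board x []) y 0 == 1) = false := by
      rw [← Bool.not_eq_true]; exact fun h => hin (hmem.mpr h)
    rw [if_neg hin, this]
    norm_num
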